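-- pv_equiv track=rewrite | github.com/subsoontornlab/OCW_python | ps6.py | is_valid_wordFast
-- ===== SOURCE A (Python) =====
-- def get_frequency_dict(sequence):
--     """
--     Returns a dictionary where the keys are elements of the sequence
--     and the values are integer counts, for the number of times that
--     an element is repeated in the sequence.
--
--     sequence: string or list
--     return: dictionary
--     """
--     # freqs: dictionary (element_type -> int)
--     freq = {}
--     for x in sequence:
--         freq[x] = freq.get(x,0) + 1
--     return freq
--
-- def is_valid_wordFast(word, hand, points_dict):
--     """
--     Returns True if word is in the word_list and is entirely
--     composed of letters in the hand. Otherwise, returns False.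
--     Does not mutate hand or word_list.
--
--     word: string
--     hand: dictionary (string -> int)
--     word_list: list of lowercase strings
--     """
--     #check if the word is entirely composed of letters in the hand
--     inHand = True
--     word_charFreq = get_frequency_dict(word)
--     for k in word_charFreq.keys():
--         if hand.get(k,0) < word_charFreq.get(k,0):
--             inHand = False
--     #check if the word is in the points_dict
--     wordpoint = points_dict.get(word, 0)
--     inWordList = (wordpoint > 0)
--     return inHand & inWordList
-- ===== SOURCE B (Python) =====
-- def is_valid_wordFast(word, hand, points_dict):
--     """
--     Same contract as A: True iff word scores in points_dict and is entirely
--     composed of letters in hand.  Single decrementing pass over the word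
--     against a mutable copy of hand; does not mutate hand.
--     """
--     wordpoint = points_dict.get(word, 0)
--     remaining = dict(hand)
--     inHand = True
--     for c in word:
--         remaining[c] = remaining.get(c, 0) - 1
--         if remaining[c] < 0:
--             inHand = False
--     return bool(inHand and wordpoint > 0)
-- ===== Notes on version B (the rewrite author's own statement) =====
-- stated objective: simpler
-- what changed: Replaces A's build-a-word-frequency-dict-then-scan-its-keys two-pass structure with a single decrementing pass over the word against a mutable copy of hand, flagging inHand=False as soon as a count drops below zero.
import Mathlib
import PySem

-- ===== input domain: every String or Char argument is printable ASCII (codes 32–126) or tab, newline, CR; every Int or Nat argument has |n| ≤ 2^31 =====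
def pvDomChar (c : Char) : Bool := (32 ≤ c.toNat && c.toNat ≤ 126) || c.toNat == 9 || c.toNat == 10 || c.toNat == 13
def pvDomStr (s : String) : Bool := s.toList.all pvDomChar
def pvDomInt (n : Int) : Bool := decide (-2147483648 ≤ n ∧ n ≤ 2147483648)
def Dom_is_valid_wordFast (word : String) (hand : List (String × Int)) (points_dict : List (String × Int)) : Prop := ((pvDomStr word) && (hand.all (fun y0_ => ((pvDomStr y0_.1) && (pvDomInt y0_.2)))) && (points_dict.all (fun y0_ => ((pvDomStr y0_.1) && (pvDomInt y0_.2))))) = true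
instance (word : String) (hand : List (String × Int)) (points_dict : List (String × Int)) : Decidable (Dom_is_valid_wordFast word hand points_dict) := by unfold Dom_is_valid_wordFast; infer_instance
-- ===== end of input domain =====

-- B replaces A's two-pass word-frequency-dict-then-key-scan with a single
-- decrementing pass over the word against a copy of hand (objective: simpler).

-- ===== PORT A =====
-- get_frequency_dict(sequence): freq = {}; for x in sequence: freq[x] = freq.get(x,0) + 1
def get_frequency_dict (sequence : List String) : PySem.Dict String Int :=
  sequence.foldl (fun freq x => freq.insert x (freq.getD x 0 + 1)) PySem.Dict.empty

def is_valid_wordFast (word : String) (hand : List (String × Int)) (points_dict : List (String × Int)) : Bool :=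
  -- iterating a Python str yields its 1-character strings
  let word_charFreq := get_frequency_dict (word.toList.map (fun c => String.ofList [c]))
  let inHand := word_charFreq.keys.foldl
    (fun inHand k =>
      if (PySem.Dict.mk hand).getD k 0 < word_charFreq.getD k 0 then false else inHand) true
  let wordpoint := (PySem.Dict.mk points_dict).getD word 0
  let inWordList := decide (wordpoint > 0)
  inHand && inWordList

-- ===== PORT B =====
def is_valid_wordFast_alt (word : String) (hand : List (String × Int)) (points_dict : List (String × Int)) : Bool :=
  let wordpoint := (PySem.Dict.mk points_dict).getD word 0
  let st := (word.toList.map (fun c => String.ofList [c])).foldl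
    (fun (st : PySem.Dict String Int × Bool) c =>
      let remaining := st.1.insert c (st.1.getD c 0 - 1)
      (remaining, if remaining.getD c 0 < 0 then false else st.2))
    (PySem.Dict.mk hand, true)
  st.2 && decide (wordpoint > 0)

-- ===== PRECONDITION & SPEC =====
def Spec_is_valid_wordFast (word : String) (hand : List (String × Int)) (points_dict : List (String × Int)) (out : Bool) : Prop := out = is_valid_wordFast_alt word hand points_dict
instance (word : String) (hand : List (String × Int)) (points_dict : List (String × Int)) (out : Bool) : Decidable (Spec_is_valid_wordFast word hand points_dict out) := by unfold Spec_is_valid_wordFast; infer_instance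

-- ===== CLAIM (what is proved, stated in full; the proofs are below) =====
def Claim_equal_is_valid_wordFast : Prop := ∀ (word : String) (hand : List (String × Int)) (points_dict : List (String × Int)), Dom_is_valid_wordFast word hand points_dict → Spec_is_valid_wordFast word hand points_dict (is_valid_wordFast word hand points_dict)

-- ===== LEMMAS AND PROOFS =====

-- A's key-scan loop is an 'all' over the keys
theorem foldl_if_false_all {α : Type} (P : α → Prop) [DecidablePred P] (l : List α) (b : Bool) :
    l.foldl (fun acc k => if P k then false else acc) b = (b && l.all (fun k => decide (¬ P k))) := by
  induction l generalizing b with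
  | nil => simp
  | cons c t ih =>
      simp only [List.foldl_cons, List.all_cons, ih]
      by_cases h : P c <;> simp [h]

-- B's decrementing loop: the inHand flag records 'every multiplicity fits'
theorem b_loop_flag (l : List String) (d : PySem.Dict String Int) (b : Bool) :
    (l.foldl
      (fun (st : PySem.Dict String Int × Bool) c =>
        (st.1.insert c (st.1.getD c 0 - 1),
          if (st.1.insert c (st.1.getD c 0 - 1)).getD c 0 < 0 then false else st.2))
      (d, b)).2
    = (b && l.all (fun x => decide ((l.count x : Int) ≤ d.getD x 0))) := by
  induction l generalizing d b with
  | nil => simp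
  | cons c t ih =>
      simp only [List.foldl_cons]
      rw [ih]
      rw [PySem.Dict.getD_insert_self]
      by_cases hneg : d.getD c 0 - 1 < 0
      · rw [if_pos hneg]
        have hfalse : ((c :: t).all (fun x => decide (((c :: t).count x : Int) ≤ d.getD x 0))) = false := by
          rw [List.all_eq_false]
          refine ⟨c, List.mem_cons_self, ?_⟩
          rw [List.count_cons_self]
          simp only [decide_eq_true_eq, not_le]
          push_cast
          omega
        simp [hfalse]
      · rw [if_neg hneg]
        rw [Bool.eq_iff_iff]
        simp only [Bool.and_eq_true, List.all_eq_true, decide_eq_true_eq]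
        refine and_congr_right fun _ => ?_
        constructor
        · intro h x hx
          rw [List.mem_cons] at hx
          rcases hx with rfl | hx
          · by_cases hc : x ∈ t
            · have hh := h x hc
              rw [PySem.Dict.getD_insert_self] at hh
              rw [List.count_cons_self]
              push_cast at hh ⊢
              omega
            · rw [List.count_cons_self, List.count_eq_zero_of_not_mem hc]
              push_cast
              omega
          · have hh := h x hx
            by_cases hxc : x = c
            · subst hxc
              rw [PySem.Dict.getD_insert_self] at hh
              rw [List.count_cons_self]
              push_cast at hh ⊢
              omega
            · simp only [PySem.Dict.getD_insert, if_neg hxc] at hh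
              have hcx : ¬ c = x := fun h => hxc h.symm
              simpa [List.count_cons, hcx] using hh
        · intro h x hx
          have hx' := h x (List.mem_cons_of_mem c hx)
          by_cases hxc : x = c
          · subst hxc
            rw [PySem.Dict.getD_insert_self]
            rw [List.count_cons_self] at hx'
            push_cast at hx' ⊢
            omega
          · simp only [PySem.Dict.getD_insert, if_neg hxc]
            have hcx : ¬ c = x := fun h => hxc h.symm
            simpa [List.count_cons, hcx] using hx'

-- ===== VERDICT (by name: the statement is the Claim_ definition above) =====
theorem is_valid_wordFast_spec : Claim_equal_is_valid_wordFast := by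
  intro word hand points_dict _
  unfold Spec_is_valid_wordFast is_valid_wordFast is_valid_wordFast_alt get_frequency_dict
  simp only []
  rw [PySem.Dict.foldl_insert_getD_add_one_eq_counter]
  rw [foldl_if_false_all, b_loop_flag]
  congr 1
  rw [Bool.true_and, Bool.eq_iff_iff]
  simp only [Bool.true_and, List.all_eq_true, PySem.Dict.keys_counter, PySem.Dict.getD_counter,
    decide_eq_true_eq, PySem.Set.mem_ofList, not_lt]
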